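-- pv_equiv track=rewrite | github.com/Miner3D-Gamer/TGE | tge/bool_operations.py | any_bit_adder
-- ===== SOURCE A (Python) =====
-- from typing import List, Tuple
--
-- def xor(a: bool, b: bool) -> bool:
--     """ Returns true if all arguments are false. """
--     return a ^ b
--
-- def half_adder(a: bool, b: bool) -> Tuple[bool, bool]:
--     """ Adds two bits. """
--     return xor(a, b), a and b
--
-- def full_adder(a: bool, b: bool, cin: bool = False) -> Tuple[bool, bool]:
--     """ Adds two bits with an optional carry input. """
--     sum1, carry1 = half_adder(a, b)
--     sum2, carry2 = half_adder(sum1, cin)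
--     return sum2, carry1 or carry2
--
-- def any_bit_adder(
--     a: List[bool], b: List[bool], carry: bool = False
-- ) -> Tuple[List[bool], bool]:
--     """
--     Adds two lists of booleans with an optional carry input.
--
--     Args:
--         a (List[bool]): First list of booleans.
--         b (List[bool]): Second list of booleans.
--         carry (bool, optional): Carry input from previous addition. Defaults to False.
--
--     Returns:
--         Tuple[List[bool], bool]: List of booleans sum and carry out.
--     """
--     if len(a) != len(b):
--         raise ValueError("Input lists must have the same length")
--
--     n = len(a)
--     result: List[bool] = []
--     for i in range(n - 1, -1, -1):
--         sum_bit, carry = full_adder(a[i], b[i], carry)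
--         result.append(sum_bit)
--
--     result.reverse()
--     return result, carry
-- ===== SOURCE B (Python) =====
-- def any_bit_adder(a, b, carry=False):
--     if len(a) != len(b):
--         raise ValueError("Input lists must have the same length")
--     ia = 0
--     for x in a:
--         ia = 2 * ia + (1 if x else 0)
--     ib = 0
--     for y in b:
--         ib = 2 * ib + (1 if y else 0)
--     total = ia + ib + (1 if carry else 0)
--     bits = []
--     for _ in range(len(a)):
--         total, r = divmod(total, 2)
--         bits.append(r == 1)
--     bits.reverse()
--     return bits, total > 0
-- ===== Notes on version B (the rewrite author's own statement) =====
-- stated objective: alternative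
-- what changed: Replaces the gate-level ripple-carry loop (full_adder per bit with a threaded carry) by whole-number arithmetic: each list is folded into an unsigned integer, the two integers and the carry are added once, and the low n bits of the total are peeled back off by repeated divmod, carry-out being the leftover quotient.
import Mathlib
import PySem

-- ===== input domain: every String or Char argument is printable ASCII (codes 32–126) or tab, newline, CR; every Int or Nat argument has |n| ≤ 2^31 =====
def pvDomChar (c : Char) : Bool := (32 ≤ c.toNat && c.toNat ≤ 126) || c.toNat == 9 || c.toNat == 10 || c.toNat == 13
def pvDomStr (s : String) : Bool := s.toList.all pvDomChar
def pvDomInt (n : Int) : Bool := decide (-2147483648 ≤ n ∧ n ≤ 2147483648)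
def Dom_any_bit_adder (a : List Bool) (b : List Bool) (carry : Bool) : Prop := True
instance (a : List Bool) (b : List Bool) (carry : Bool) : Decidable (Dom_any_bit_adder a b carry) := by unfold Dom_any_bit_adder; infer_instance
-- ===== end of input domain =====

-- B replaces the per-bit ripple of full_adder gates by whole-number arithmetic: fold each list
-- into an integer, add once, then peel the low n bits back off by repeated divmod (objective: alternative).

-- ===== PORT A =====
def pyXor (a : Bool) (b : Bool) : Bool := xor a b

def half_adder (a : Bool) (b : Bool) : Bool × Bool := (pyXor a b, a && b)

def full_adder (a : Bool) (b : Bool) (cin : Bool) : Bool × Bool :=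
  let s1 := half_adder a b
  let s2 := half_adder s1.1 cin
  (s2.1, s1.2 || s2.2)

-- the 'raise ValueError' on unequal lengths is excluded by Pre_any_bit_adder
def any_bit_adder (a : List Bool) (b : List Bool) (carry : Bool) : List Bool × Bool :=
  let n : Int := a.length
  let st := (PySem.List.pyRange (n - 1) (-1) (-1)).foldl
    (fun (st : List Bool × Bool) i =>
      let fa := full_adder (PySem.List.pyGetD a i false) (PySem.List.pyGetD b i false) st.2
      (st.1 ++ [fa.1], fa.2))
    (([] : List Bool), carry)
  (st.1.reverse, st.2)

-- ===== PORT B =====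
-- the 'raise ValueError' on unequal lengths is excluded by Pre_any_bit_adder
def any_bit_adder_alt (a : List Bool) (b : List Bool) (carry : Bool) : List Bool × Bool :=
  let ia := a.foldl (fun acc x => 2 * acc + (if x then 1 else 0)) (0 : Int)
  let ib := b.foldl (fun acc y => 2 * acc + (if y then 1 else 0)) (0 : Int)
  let total0 : Int := ia + ib + (if carry then 1 else 0)
  -- divmod(total, 2): divisor is the nonzero literal 2, so floordiv/mod are exact here
  let st := (PySem.List.pyRange 0 (a.length : Int) 1).foldl
    (fun (st : Int × List Bool) _ =>
      (PySem.Int.floordiv st.1 2, st.2 ++ [decide (PySem.Int.mod st.1 2 = 1)]))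
    (total0, ([] : List Bool))
  (st.2.reverse, decide (st.1 > 0))

-- ===== PRECONDITION & SPEC =====
-- Pre_ excludes exactly the inputs where Python A raises ValueError (unequal lengths); B raises there too.
def Pre_any_bit_adder (a : List Bool) (b : List Bool) (carry : Bool) : Prop := a.length = b.length
instance (a : List Bool) (b : List Bool) (carry : Bool) : Decidable (Pre_any_bit_adder a b carry) := by unfold Pre_any_bit_adder; infer_instance

def pvWitness_any_bit_adder : List Bool × List Bool × Bool := ([true, false], [true, true], false)

def Spec_any_bit_adder (a : List Bool) (b : List Bool) (carry : Bool) (out : List Bool × Bool) : Prop := out = any_bit_adder_alt a b carry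
instance (a : List Bool) (b : List Bool) (carry : Bool) (out : List Bool × Bool) : Decidable (Spec_any_bit_adder a b carry out) := by unfold Spec_any_bit_adder; infer_instance

-- ===== CLAIM (what is proved, stated in full; the proofs are below) =====
def Claim_equal_any_bit_adder : Prop := ∀ (a : List Bool) (b : List Bool) (carry : Bool), Dom_any_bit_adder a b carry → Pre_any_bit_adder a b carry → Spec_any_bit_adder a b carry (any_bit_adder a b carry)

-- ===== LEMMAS AND PROOFS =====

/-- Numeric value (MSB first) of a bit list, in Nat. -/
def bitsVal (l : List Bool) : Nat := l.foldl (fun acc bit => 2 * acc + bit.toNat) 0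

theorem bitsVal_append_singleton (l : List Bool) (x : Bool) :
    bitsVal (l ++ [x]) = 2 * bitsVal l + x.toNat := by
  simp [bitsVal, List.foldl_append]

theorem full_adder_val (x y c : Bool) :
    (full_adder x y c).1.toNat + 2 * (full_adder x y c).2.toNat = x.toNat + y.toNat + c.toNat := by
  revert x y c; decide

/-- Core invariant: A's downward loop appends the low bits (LSB first) of the integer sum
    and ends with its carry, for any accumulated prefix. -/
theorem loopA_eq (a b : List Bool) (c : Bool) (acc : List Bool)
    (h : a.length = b.length) :
    (PySem.List.pyRange ((a.length : Int) - 1) (-1) (-1)).foldl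
      (fun (st : List Bool × Bool) i =>
        (st.1 ++ [(full_adder (PySem.List.pyGetD a i false) (PySem.List.pyGetD b i false) st.2).1],
         (full_adder (PySem.List.pyGetD a i false) (PySem.List.pyGetD b i false) st.2).2))
      (acc, c)
    = (acc ++ (List.range a.length).map
          (fun k => decide ((bitsVal a + bitsVal b + c.toNat) / 2 ^ k % 2 = 1)),
       decide (2 ^ a.length ≤ bitsVal a + bitsVal b + c.toNat)) := by
  induction a using List.reverseRecOn generalizing b c acc with
  | nil =>
    have hb : b = [] := by
      cases b with
      | nil => rfl
      | cons _ _ => simp at h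
    subst hb
    rw [PySem.List.pyRange_neg_one_eq_nil (by norm_num)]
    cases c <;> simp [bitsVal]
  | append_singleton a' x ih =>
    cases b using List.reverseRecOn with
    | nil => simp at h
    | append_singleton b' y =>
      have hlen : a'.length = b'.length := by simpa using h
      set n' := a'.length with hn'
      have hab : a'.length = b'.length := hlen
      have hcons : PySem.List.pyRange (((a' ++ [x]).length : Int) - 1) (-1) (-1)
          = ((n' : Int)) :: PySem.List.pyRange ((n' : Int) - 1) (-1) (-1) := by
        have he : (((a' ++ [x]).length : Int) - 1) = (n' : Int) := by
          simp [hn']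
        rw [he, PySem.List.pyRange_neg_one_cons (by omega)]
      rw [hcons]
      simp only [List.foldl_cons]
      have hgx : PySem.List.pyGetD (a' ++ [x]) ((n' : Int)) false = x := by
        simp [PySem.List.pyGetD_natCast, hn']
      have hgy : PySem.List.pyGetD (b' ++ [y]) ((n' : Int)) false = y := by
        rw [hn', hab]
        simp [PySem.List.pyGetD_natCast]
      rw [hgx, hgy]
      set s := (full_adder x y c).1 with hs
      set c1 := (full_adder x y c).2 with hc1
      have hcong :
          (PySem.List.pyRange ((n' : Int) - 1) (-1) (-1)).foldl
            (fun (st : List Bool × Bool) i =>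
              (st.1 ++ [(full_adder (PySem.List.pyGetD (a' ++ [x]) i false)
                  (PySem.List.pyGetD (b' ++ [y]) i false) st.2).1],
               (full_adder (PySem.List.pyGetD (a' ++ [x]) i false)
                  (PySem.List.pyGetD (b' ++ [y]) i false) st.2).2)) (acc ++ [s], c1)
          = (PySem.List.pyRange ((n' : Int) - 1) (-1) (-1)).foldl
            (fun (st : List Bool × Bool) i =>
              (st.1 ++ [(full_adder (PySem.List.pyGetD a' i false)
                  (PySem.List.pyGetD b' i false) st.2).1],
               (full_adder (PySem.List.pyGetD a' i false)
                  (PySem.List.pyGetD b' i false) st.2).2)) (acc ++ [s], c1) := by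
        apply PySem.List.foldl_congr_mem
        intro st i hi
        have hmem := (PySem.List.mem_pyRange_neg_one).1 hi
        have h0 : 0 ≤ i := by omega
        have hlt : i < (n' : Int) := by omega
        obtain ⟨j, rfl⟩ := Int.eq_ofNat_of_zero_le h0
        have hj : j < n' := by exact_mod_cast hlt
        have hga : PySem.List.pyGetD (a' ++ [x]) ((j : Int)) false
            = PySem.List.pyGetD a' ((j : Int)) false := by
          simp [PySem.List.pyGetD_natCast, List.getD,
            List.getElem?_append_left (by omega : j < a'.length)]
        have hgb : PySem.List.pyGetD (b' ++ [y]) ((j : Int)) false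
            = PySem.List.pyGetD b' ((j : Int)) false := by
          simp [PySem.List.pyGetD_natCast, List.getD,
            List.getElem?_append_left (by omega : j < b'.length)]
        simp [hga, hgb]
      rw [hcong, ih b' c1 (acc ++ [s]) hlen]
      have hfa : s.toNat + 2 * c1.toNat = x.toNat + y.toNat + c.toNat := by
        rw [hs, hc1]; exact full_adder_val x y c
      have hT : bitsVal (a' ++ [x]) + bitsVal (b' ++ [y]) + c.toNat
          = 2 * (bitsVal a' + bitsVal b' + c1.toNat) + s.toNat := by
        rw [bitsVal_append_singleton, bitsVal_append_singleton]
        omega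
      set T' := bitsVal a' + bitsVal b' + c1.toNat with hT'
      set T := bitsVal (a' ++ [x]) + bitsVal (b' ++ [y]) + c.toNat with hTdef
      have hs1 : s.toNat ≤ 1 := by cases s <;> simp
      have hdiv : T / 2 = T' := by omega
      have hlen2 : (a' ++ [x]).length = n' + 1 := by simp [hn']
      congr 1
      · rw [List.append_assoc]
        congr 1
        rw [hlen2, List.range_succ_eq_map, List.map_cons, List.map_map, List.singleton_append]
        congr 1
        · have hm : T % 2 = s.toNat := by omega
          rw [pow_zero, Nat.div_one, hm]
          cases s <;> simp
        · apply List.map_congr_left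
          intro k _
          have hstep : T / 2 ^ (k + 1) = T' / 2 ^ k := by
            rw [pow_succ, ← hdiv, Nat.div_div_eq_div_mul, Nat.mul_comm 2 (2 ^ k)]
          simp [Function.comp, hstep]
      · rw [hlen2]
        have h2 : 2 ^ (n' + 1) = 2 * 2 ^ n' := by ring
        simp only [decide_eq_decide]
        constructor <;> intro hle <;> omega

/-- B's first stage: folding a bit list into an Int computes (a cast of) `bitsVal`. -/
theorem foldl_int_eq_bitsVal (l : List Bool) (c : Nat) :
    l.foldl (fun acc x => 2 * acc + (if x then 1 else 0)) ((c : Nat) : Int)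
      = ((l.foldl (fun acc bit => 2 * acc + bit.toNat) c : Nat) : Int) := by
  induction l generalizing c with
  | nil => rfl
  | cons x l' ih =>
    simp only [List.foldl_cons]
    have hx : (2 * ((c : Nat) : Int) + (if x then 1 else 0))
        = (((2 * c + x.toNat : Nat)) : Int) := by
      cases x <;> simp
    rw [hx, ih]

/-- B's third stage: n rounds of divmod by 2 peel off the low n bits (LSB first),
    leaving the quotient shifted down by n. -/
theorem peel_eq (n : Nat) (C : Nat) (acc : List Bool) :
    (PySem.List.pyRange 0 (n : Int) 1).foldl
      (fun (st : Int × List Bool) _ =>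
        (PySem.Int.floordiv st.1 2, st.2 ++ [decide (PySem.Int.mod st.1 2 = 1)]))
      (((C : Nat) : Int), acc)
    = ((((C / 2 ^ n : Nat)) : Int),
       acc ++ (List.range n).map (fun k => decide (C / 2 ^ k % 2 = 1))) := by
  induction n generalizing C acc with
  | zero =>
    rw [PySem.List.pyRange_one_eq_nil (by norm_num)]
    simp
  | succ m ih =>
    have hsplit : PySem.List.pyRange 0 ((m + 1 : Nat) : Int) 1
        = PySem.List.pyRange 0 (m : Int) 1 ++ [(m : Int)] := by
      push_cast
      exact PySem.List.pyRange_one_succ_right (by positivity)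
    rw [hsplit, List.foldl_append, ih C acc]
    simp only [List.foldl_cons, List.foldl_nil]
    have hd : PySem.Int.floordiv (((C / 2 ^ m : Nat)) : Int) 2
        = (((C / 2 ^ m / 2 : Nat)) : Int) := by
      exact_mod_cast PySem.Int.floordiv_natCast (C / 2 ^ m) 2
    have hm : PySem.Int.mod (((C / 2 ^ m : Nat)) : Int) 2
        = (((C / 2 ^ m % 2 : Nat)) : Int) := by
      exact_mod_cast PySem.Int.mod_natCast (C / 2 ^ m) 2
    rw [hd, hm]
    have hq : C / 2 ^ m / 2 = C / 2 ^ (m + 1) := by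
      rw [pow_succ, Nat.div_div_eq_div_mul]
    rw [hq]
    congr 1
    rw [List.append_assoc, List.range_succ, List.map_append, List.map_singleton]
    congr 2
    norm_num
    norm_cast

-- ===== VERDICT (by name: the statement is the Claim_ definition above) =====
theorem foldl_int_zero (l : List Bool) :
    l.foldl (fun acc x => 2 * acc + (if x then 1 else 0)) (0 : Int) = ((bitsVal l : Nat) : Int) := by
  simpa [bitsVal] using foldl_int_eq_bitsVal l 0

theorem any_bit_adder_spec : Claim_equal_any_bit_adder := by
  intro a b carry _ hpre
  unfold Spec_any_bit_adder
  simp only [any_bit_adder, any_bit_adder_alt]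
  rw [loopA_eq a b carry [] hpre]
  rw [foldl_int_zero a, foldl_int_zero b]
  have hc : ((bitsVal a : Nat) : Int) + ((bitsVal b : Nat) : Int) + (if carry then 1 else 0)
      = (((bitsVal a + bitsVal b + carry.toNat : Nat)) : Int) := by
    cases carry <;> push_cast <;> simp
  rw [hc, peel_eq a.length (bitsVal a + bitsVal b + carry.toNat) []]
  set T := bitsVal a + bitsVal b + carry.toNat with hT
  simp only [List.nil_append]
  congr 1
  have hpos : 0 < 2 ^ a.length := Nat.two_pow_pos a.length
  simp only [decide_eq_decide, gt_iff_lt, Int.natCast_pos]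
  rw [Nat.div_pos_iff]
  omega
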